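-- pv_equiv track=rewrite | github.com/yossy6028/social-exam-analyzer | modules/year_detector.py | _get_highest_priority_year
-- ===== SOURCE A (Python) =====
-- from typing import List, Dict, Tuple, Optional
--
-- def _get_highest_priority_year(years: List[str], patterns: Dict) -> Optional[str]:
--     """最も優先度が高いパターンで検出された年度を選択"""
--     pattern_priority = {
--         'year_kanji': 11,
--         'reiwa': 8,
--         'year_4digit': 9,
--         'heisei': 7,
--         'year_2digit': 5
--     }
--
--     best_year = None
--     best_priority = -1
--
--     for pattern_name, matches in patterns.items():
--         if pattern_name in pattern_priority:
--             priority = pattern_priority[pattern_name]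
--
--             for pos, year in matches:
--                 if year in years and priority > best_priority:
--                     best_year = year
--                     best_priority = priority
--
--     return best_year
-- ===== SOURCE B (Python) =====
-- from typing import List, Dict, Optional
--
-- def _get_highest_priority_year(years: List[str], patterns: Dict) -> Optional[str]:
--     """Priority-ordered early-exit search instead of a full max-tracking scan."""
--     for name in ('year_kanji', 'year_4digit', 'reiwa', 'heisei', 'year_2digit'):
--         for _pos, year in patterns.get(name, []):
--             if year in years:
--                 return year
--     return None
-- ===== Notes on version B (the rewrite author's own statement) =====
-- stated objective: simpler
-- what changed: Replaced A's full nested scan with max-priority tracking state by an early-exit search that visits the pattern names in fixed descending-priority order and returns the first in-list year it finds.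
import Mathlib
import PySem

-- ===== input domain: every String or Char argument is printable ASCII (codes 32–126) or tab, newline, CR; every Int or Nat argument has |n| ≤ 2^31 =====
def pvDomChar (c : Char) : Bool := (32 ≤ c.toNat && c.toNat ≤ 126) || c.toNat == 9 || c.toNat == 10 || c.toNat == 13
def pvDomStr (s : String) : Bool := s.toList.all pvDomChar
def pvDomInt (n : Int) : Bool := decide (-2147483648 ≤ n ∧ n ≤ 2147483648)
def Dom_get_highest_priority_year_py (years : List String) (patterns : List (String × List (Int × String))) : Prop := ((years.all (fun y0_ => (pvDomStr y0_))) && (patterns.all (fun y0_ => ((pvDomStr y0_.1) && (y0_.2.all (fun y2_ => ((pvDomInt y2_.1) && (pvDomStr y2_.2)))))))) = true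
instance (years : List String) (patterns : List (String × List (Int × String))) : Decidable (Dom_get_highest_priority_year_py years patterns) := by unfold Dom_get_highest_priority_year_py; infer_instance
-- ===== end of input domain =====

-- B replaces A's full max-tracking scan by an early-exit search over pattern names in descending priority order (equal return values; no mutation).


-- ===== PORT A =====
-- inner 'for pos, year in matches' loop body of A
def pvInnerLoop (years : List String) (priority : Int) (st : Option String × Int) (py : Int × String) : Option String × Int :=
  if years.contains py.2 && decide (priority > st.2) then (some py.2, priority) else st

-- outer 'for pattern_name, matches in patterns.items()' loop body of A
def pvOuterLoop (years : List String) (pattern_priority : PySem.Dict String Int) (st : Option String × Int) (pm : String × List (Int × String)) : Option String × Int :=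
  match pattern_priority.get? pm.1 with
  | some priority => pm.2.foldl (pvInnerLoop years priority) st
  | none => st

def get_highest_priority_year_py (years : List String) (patterns : List (String × List (Int × String))) : Option String :=
  let pattern_priority : PySem.Dict String Int :=
    PySem.Dict.mk [("year_kanji", 11), ("reiwa", 8), ("year_4digit", 9), ("heisei", 7), ("year_2digit", 5)]
  (patterns.foldl (pvOuterLoop years pattern_priority) (none, -1)).1

-- ===== PORT B =====
-- B's inner loop: first year of the matches that occurs in `years`
def pvFirstYear (years : List String) : List (Int × String) → Option String
  | [] => none
  | m :: rest => if years.contains m.2 then some m.2 else pvFirstYear years rest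

-- B's outer loop over the name tuple, with early return
def pvSearch (years : List String) (patterns : List (String × List (Int × String))) : List String → Option String
  | [] => none
  | n :: rest =>
    match pvFirstYear years ((PySem.Dict.mk patterns).getD n []) with
    | some y => some y
    | none => pvSearch years patterns rest

def get_highest_priority_year_py_alt (years : List String) (patterns : List (String × List (Int × String))) : Option String :=
  pvSearch years patterns ["year_kanji", "year_4digit", "reiwa", "heisei", "year_2digit"]

-- ===== PRECONDITION & SPEC =====
-- Pre_ excludes association lists whose pattern-name keys repeat: a Python dict always has unique keys, so such lists cannot arise from A's actual argument and their behaviour is a representational artefact.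
def Pre_get_highest_priority_year_py (years : List String) (patterns : List (String × List (Int × String))) : Prop :=
  (patterns.map Prod.fst).Nodup

instance (years : List String) (patterns : List (String × List (Int × String))) : Decidable (Pre_get_highest_priority_year_py years patterns) := by unfold Pre_get_highest_priority_year_py; infer_instance

def pvWitness_get_highest_priority_year_py : List String × (List (String × List (Int × String))) :=
  (["2024"], [("reiwa", [(0, "2024")]), ("year_4digit", [])])

def Spec_get_highest_priority_year_py (years : List String) (patterns : List (String × List (Int × String))) (out : Option String) : Prop := out = get_highest_priority_year_py_alt years patterns
instance (years : List String) (patterns : List (String × List (Int × String))) (out : Option String) : Decidable (Spec_get_highest_priority_year_py years patterns out) := by unfold Spec_get_highest_priority_year_py; infer_instance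

-- ===== CLAIM (what is proved, stated in full; the proofs are below) =====
def Claim_equal_get_highest_priority_year_py : Prop := ∀ (years : List String) (patterns : List (String × List (Int × String))), Dom_get_highest_priority_year_py years patterns → Pre_get_highest_priority_year_py years patterns → Spec_get_highest_priority_year_py years patterns (get_highest_priority_year_py years patterns)

-- ===== LEMMAS AND PROOFS =====

-- the five known pattern names with their priorities, in descending priority order
def pvPrioList : List (String × Int) :=
  [("year_kanji", 11), ("year_4digit", 9), ("reiwa", 8), ("heisei", 7), ("year_2digit", 5)]

-- spec of A's scan: first name in descending order with priority above bp whose matches contain a year from `years`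
def pvPick (years : List String) (patterns : List (String × List (Int × String))) (bp : Int) : List (String × Int) → Option (String × Int)
  | [] => none
  | q :: ns =>
    if q.2 > bp then
      match pvFirstYear years ((PySem.Dict.mk patterns).getD q.1 []) with
      | some y => some (y, q.2)
      | none => pvPick years patterns bp ns
    else pvPick years patterns bp ns

theorem pv_getD_mk_cons (k : String) (ms : List (Int × String)) (rest : List (String × List (Int × String))) (n : String) :
    (PySem.Dict.mk ((k, ms) :: rest)).getD n [] = if k == n then ms else (PySem.Dict.mk rest).getD n [] := by
  rw [PySem.Dict.getD_eq_get?_getD, PySem.Dict.getD_eq_get?_getD, PySem.Dict.get?_mk_cons]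
  split <;> rfl

theorem pv_getD_not_mem (rest : List (String × List (Int × String))) (n : String) (h : n ∉ rest.map Prod.fst) :
    (PySem.Dict.mk rest).getD n [] = [] := by
  rw [PySem.Dict.getD_eq_get?_getD]
  have : (PySem.Dict.mk rest).get? n = none := by
    rw [PySem.Dict.get?_eq_none_iff_not_mem_keys]
    simpa [PySem.Dict.keys_mk] using h
  rw [this]; rfl

theorem pv_inner (years : List String) (p : Int) (ms : List (Int × String)) (b : Option String) (bp : Int) :
    ms.foldl (pvInnerLoop years p) (b, bp)
      = if p > bp then (match pvFirstYear years ms with | some y => (some y, p) | none => (b, bp)) else (b, bp) := by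
  induction ms generalizing b bp with
  | nil => simp [pvFirstYear]
  | cons m ms ih =>
    by_cases hc : m.2 ∈ years
    · by_cases hp : p > bp
      · simp [pvInnerLoop, hc, hp, pvFirstYear, ih]
      · simp [pvInnerLoop, hc, hp, ih]
    · simp [pvInnerLoop, hc, pvFirstYear, ih]

theorem pv_pick_congr (years : List String) (P1 P2 : List (String × List (Int × String))) (ns : List (String × Int)) (bp : Int)
    (h : ∀ q ∈ ns, q.2 > bp → pvFirstYear years ((PySem.Dict.mk P1).getD q.1 []) = pvFirstYear years ((PySem.Dict.mk P2).getD q.1 [])) :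
    pvPick years P1 bp ns = pvPick years P2 bp ns := by
  induction ns with
  | nil => rfl
  | cons q ns ih =>
    by_cases hq : q.2 > bp
    · have := h q (List.mem_cons_self) hq
      simp only [pvPick, hq, if_true, this]
      cases (pvFirstYear years ((PySem.Dict.mk P2).getD q.1 [])) with
      | none => exact ih (fun r hr => h r (List.mem_cons_of_mem _ hr))
      | some y => rfl
    · simp only [pvPick, hq, if_false]
      exact ih (fun r hr => h r (List.mem_cons_of_mem _ hr))

theorem pv_outer (years : List String) (L : List (String × List (Int × String))) (b : Option String) (bp : Int)
    (hnd : (L.map Prod.fst).Nodup) :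
    L.foldl (pvOuterLoop years (PySem.Dict.mk [("year_kanji", 11), ("reiwa", 8), ("year_4digit", 9), ("heisei", 7), ("year_2digit", 5)])) (b, bp)
      = match pvPick years L bp pvPrioList with
        | some yp => (some yp.1, yp.2)
        | none => (b, bp) := by
  induction L generalizing b bp with
  | nil =>
    simp [pvPick, pvPrioList, pvFirstYear, pv_getD_not_mem]
  | cons e L ih =>
    obtain ⟨n, ms⟩ := e
    have hnotin : n ∉ L.map Prod.fst := (List.nodup_cons.mp (by simpa using hnd)).1
    have hnd' : (L.map Prod.fst).Nodup := (List.nodup_cons.mp (by simpa using hnd)).2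
    simp only [List.foldl_cons]
    by_cases h1 : n = "year_kanji"
    · subst h1
      have hget : (PySem.Dict.mk [("year_kanji", (11:Int)), ("reiwa", 8), ("year_4digit", 9), ("heisei", 7), ("year_2digit", 5)]).get? "year_kanji" = some 11 := rfl
      simp only [pvOuterLoop, hget]
      rw [pv_inner]
      by_cases hp : (11:Int) > bp
      · rw [if_pos hp]
        rcases hf : pvFirstYear years ms with _ | y
        · rw [ih b bp hnd', pv_pick_congr years (("year_kanji", ms) :: L) L pvPrioList bp ?_]
          intro q hq hqbp
          fin_cases hq <;> simp [pv_getD_mk_cons, pv_getD_not_mem L _ hnotin, hf, pvFirstYear]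
        · rw [ih (some y) 11 hnd']

          simp [pvPick, pvPrioList, pv_getD_mk_cons, hf, hp]
      · rw [if_neg hp, ih b bp hnd', pv_pick_congr years (("year_kanji", ms) :: L) L pvPrioList bp ?_]
        intro q hq hqbp
        fin_cases hq <;> omega
    by_cases h2 : n = "year_4digit"
    · subst h2
      have hget : (PySem.Dict.mk [("year_kanji", (11:Int)), ("reiwa", 8), ("year_4digit", 9), ("heisei", 7), ("year_2digit", 5)]).get? "year_4digit" = some 9 := rfl
      simp only [pvOuterLoop, hget]
      rw [pv_inner]
      by_cases hp : (9:Int) > bp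
      · rw [if_pos hp]
        rcases hf : pvFirstYear years ms with _ | y
        · rw [ih b bp hnd', pv_pick_congr years (("year_4digit", ms) :: L) L pvPrioList bp ?_]
          intro q hq hqbp
          fin_cases hq <;> simp [pv_getD_mk_cons, pv_getD_not_mem L _ hnotin, hf, pvFirstYear]
        · rw [ih (some y) 9 hnd']
          have ha11 : (11:Int) > bp := by omega
          simp [pvPick, pvPrioList, pv_getD_mk_cons, hf, hp, ha11]
          rcases pvFirstYear years ((PySem.Dict.mk L).getD "year_kanji" []) with _ | y1 <;> simp
      · rw [if_neg hp, ih b bp hnd', pv_pick_congr years (("year_4digit", ms) :: L) L pvPrioList bp ?_]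
        intro q hq hqbp
        fin_cases hq <;> first
          | omega
          | simp [pv_getD_mk_cons]
    by_cases h3 : n = "reiwa"
    · subst h3
      have hget : (PySem.Dict.mk [("year_kanji", (11:Int)), ("reiwa", 8), ("year_4digit", 9), ("heisei", 7), ("year_2digit", 5)]).get? "reiwa" = some 8 := rfl
      simp only [pvOuterLoop, hget]
      rw [pv_inner]
      by_cases hp : (8:Int) > bp
      · rw [if_pos hp]
        rcases hf : pvFirstYear years ms with _ | y
        · rw [ih b bp hnd', pv_pick_congr years (("reiwa", ms) :: L) L pvPrioList bp ?_]
          intro q hq hqbp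
          fin_cases hq <;> simp [pv_getD_mk_cons, pv_getD_not_mem L _ hnotin, hf, pvFirstYear]
        · rw [ih (some y) 8 hnd']
          have ha11 : (11:Int) > bp := by omega
          have ha9 : (9:Int) > bp := by omega
          simp [pvPick, pvPrioList, pv_getD_mk_cons, hf, hp, ha11, ha9]
          rcases pvFirstYear years ((PySem.Dict.mk L).getD "year_kanji" []) with _ | y1 <;>
            rcases pvFirstYear years ((PySem.Dict.mk L).getD "year_4digit" []) with _ | y2 <;> simp
      · rw [if_neg hp, ih b bp hnd', pv_pick_congr years (("reiwa", ms) :: L) L pvPrioList bp ?_]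
        intro q hq hqbp
        fin_cases hq <;> first
          | omega
          | simp [pv_getD_mk_cons]
    by_cases h4 : n = "heisei"
    · subst h4
      have hget : (PySem.Dict.mk [("year_kanji", (11:Int)), ("reiwa", 8), ("year_4digit", 9), ("heisei", 7), ("year_2digit", 5)]).get? "heisei" = some 7 := rfl
      simp only [pvOuterLoop, hget]
      rw [pv_inner]
      by_cases hp : (7:Int) > bp
      · rw [if_pos hp]
        rcases hf : pvFirstYear years ms with _ | y
        · rw [ih b bp hnd', pv_pick_congr years (("heisei", ms) :: L) L pvPrioList bp ?_]
          intro q hq hqbp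
          fin_cases hq <;> simp [pv_getD_mk_cons, pv_getD_not_mem L _ hnotin, hf, pvFirstYear]
        · rw [ih (some y) 7 hnd']
          have ha11 : (11:Int) > bp := by omega
          have ha9 : (9:Int) > bp := by omega
          have ha8 : (8:Int) > bp := by omega
          simp [pvPick, pvPrioList, pv_getD_mk_cons, hf, hp, ha11, ha9, ha8]
          rcases pvFirstYear years ((PySem.Dict.mk L).getD "year_kanji" []) with _ | y1 <;>
            rcases pvFirstYear years ((PySem.Dict.mk L).getD "year_4digit" []) with _ | y2 <;>
            rcases pvFirstYear years ((PySem.Dict.mk L).getD "reiwa" []) with _ | y3 <;> simp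
      · rw [if_neg hp, ih b bp hnd', pv_pick_congr years (("heisei", ms) :: L) L pvPrioList bp ?_]
        intro q hq hqbp
        fin_cases hq <;> first
          | omega
          | simp [pv_getD_mk_cons]
    by_cases h5 : n = "year_2digit"
    · subst h5
      have hget : (PySem.Dict.mk [("year_kanji", (11:Int)), ("reiwa", 8), ("year_4digit", 9), ("heisei", 7), ("year_2digit", 5)]).get? "year_2digit" = some 5 := rfl
      simp only [pvOuterLoop, hget]
      rw [pv_inner]
      by_cases hp : (5:Int) > bp
      · rw [if_pos hp]
        rcases hf : pvFirstYear years ms with _ | y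
        · rw [ih b bp hnd', pv_pick_congr years (("year_2digit", ms) :: L) L pvPrioList bp ?_]
          intro q hq hqbp
          fin_cases hq <;> simp [pv_getD_mk_cons, pv_getD_not_mem L _ hnotin, hf, pvFirstYear]
        · rw [ih (some y) 5 hnd']
          have ha11 : (11:Int) > bp := by omega
          have ha9 : (9:Int) > bp := by omega
          have ha8 : (8:Int) > bp := by omega
          have ha7 : (7:Int) > bp := by omega
          simp [pvPick, pvPrioList, pv_getD_mk_cons, hf, hp, ha11, ha9, ha8, ha7]
          rcases pvFirstYear years ((PySem.Dict.mk L).getD "year_kanji" []) with _ | y1 <;>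
            rcases pvFirstYear years ((PySem.Dict.mk L).getD "year_4digit" []) with _ | y2 <;>
            rcases pvFirstYear years ((PySem.Dict.mk L).getD "reiwa" []) with _ | y3 <;>
            rcases pvFirstYear years ((PySem.Dict.mk L).getD "heisei" []) with _ | y4 <;> simp
      · rw [if_neg hp, ih b bp hnd', pv_pick_congr years (("year_2digit", ms) :: L) L pvPrioList bp ?_]
        intro q hq hqbp
        fin_cases hq <;> first
          | omega
          | simp [pv_getD_mk_cons]
    · -- n is not one of the five known pattern names
      have hget : (PySem.Dict.mk [("year_kanji", (11:Int)), ("reiwa", 8), ("year_4digit", 9), ("heisei", 7), ("year_2digit", 5)]).get? n = none := by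
        simp [PySem.Dict.get?_mk_cons, beq_iff_eq, Ne.symm h1, Ne.symm h2, Ne.symm h3, Ne.symm h4, Ne.symm h5]
        rfl
      simp only [pvOuterLoop, hget]
      rw [ih b bp hnd', pv_pick_congr years ((n, ms) :: L) L pvPrioList bp ?_]
      intro q hq hqbp
      fin_cases hq <;> simp [pv_getD_mk_cons, beq_iff_eq, h1, h2, h3, h4, h5]

theorem pv_bridge (years : List String) (patterns : List (String × List (Int × String))) (ns : List (String × Int))
    (h : ∀ q ∈ ns, (-1 : Int) < q.2) :
    pvSearch years patterns (ns.map Prod.fst)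
      = match pvPick years patterns (-1) ns with | some yp => some yp.1 | none => none := by
  induction ns with
  | nil => rfl
  | cons q ns ih =>
    have hq : q.2 > (-1 : Int) := h q List.mem_cons_self
    simp only [List.map_cons, pvSearch, pvPick, hq, if_true]
    cases (pvFirstYear years ((PySem.Dict.mk patterns).getD q.1 [])) with
    | none => exact ih (fun r hr => h r (List.mem_cons_of_mem _ hr))
    | some y => rfl

-- ===== VERDICT (by name: the statement is the Claim_ definition above) =====
theorem get_highest_priority_year_py_spec : Claim_equal_get_highest_priority_year_py := by
  intro years patterns _ hpre
  unfold Spec_get_highest_priority_year_py get_highest_priority_year_py get_highest_priority_year_py_alt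
  show (patterns.foldl (pvOuterLoop years (PySem.Dict.mk [("year_kanji", 11), ("reiwa", 8), ("year_4digit", 9), ("heisei", 7), ("year_2digit", 5)])) (none, -1)).1 = _
  rw [pv_outer years patterns none (-1) hpre]
  have hb := pv_bridge years patterns pvPrioList (by intro q hq; fin_cases hq <;> norm_num)
  have : pvPrioList.map Prod.fst = ["year_kanji", "year_4digit", "reiwa", "heisei", "year_2digit"] := rfl
  rw [this] at hb
  rw [hb]
  cases (pvPick years patterns (-1) pvPrioList) <;> rfl
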